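-- pv_equiv track=rewrite | github.com/nabeelwaheed/ScholarScout-PC_Finder- | backend/topic_extraction.py | _titles_to_doc
-- ===== SOURCE A (Python) =====
-- from typing import Iterable, Optional, Tuple, Dict, List
--
-- def _normalize_text(s: str) -> str:
--     s = (s or "").lower()
--     # Remove obvious noise
--     s = s.replace("\n", " ").replace("\t", " ")
--     # Collapse whitespace
--     s = " ".join(s.split())
--     return s
--
-- def _titles_to_doc(titles: Iterable[str]) -> str:
--     cleaned: List[str] = []
--     for t in titles:
--         t = _normalize_text(t)
--         if not t:
--             continue
--         cleaned.append(t)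
--     return " ".join(cleaned)
-- ===== SOURCE B (Python) =====
-- def _normalize_text(s: str) -> str:
--     s = (s or "").lower()
--     # Remove obvious noise
--     s = s.replace("\n", " ").replace("\t", " ")
--     # Collapse whitespace
--     s = " ".join(s.split())
--     return s
--
-- def _titles_to_doc(titles):
--     # Concatenate everything first; one global normalization pass
--     # collapses the gaps left by empty/whitespace-only titles.
--     return _normalize_text(" ".join(t or "" for t in titles))
-- ===== Notes on version B (the rewrite author's own statement) =====
-- stated objective: simpler
-- what changed: B joins all raw titles into one string first and applies _normalize_text once globally, letting the single whitespace-collapse absorb empty/whitespace-only titles, instead of A's per-title normalize-filter-append loop.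
import Mathlib
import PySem

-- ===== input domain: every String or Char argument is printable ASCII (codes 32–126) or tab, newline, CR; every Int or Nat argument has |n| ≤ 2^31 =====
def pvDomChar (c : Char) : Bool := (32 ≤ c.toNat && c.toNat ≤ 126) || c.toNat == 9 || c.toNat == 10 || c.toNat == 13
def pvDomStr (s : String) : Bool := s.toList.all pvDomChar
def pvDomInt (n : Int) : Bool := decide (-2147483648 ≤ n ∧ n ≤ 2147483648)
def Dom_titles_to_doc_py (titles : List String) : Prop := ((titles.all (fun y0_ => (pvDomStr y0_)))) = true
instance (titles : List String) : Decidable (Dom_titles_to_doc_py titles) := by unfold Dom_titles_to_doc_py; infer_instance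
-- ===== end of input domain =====

-- B normalizes once globally instead of per-title: join the raw titles and let the single
-- whitespace-collapse absorb empty/whitespace-only titles (simpler decomposition, same cost).

-- ===== PORT A =====
-- shared module helper _normalize_text, transliterated
def normalize_text_py (s : String) : String :=
  let s1 := PySem.Str.lower s
  let s2 := PySem.Str.replace s1 "\n" " "
  let s3 := PySem.Str.replace s2 "\t" " "
  PySem.Str.join " " (PySem.Str.split₀ s3)

def titles_to_doc_py (titles : List String) : String :=
  let cleaned := titles.foldl (fun cleaned t =>
    let t' := normalize_text_py t
    if t' = "" then cleaned else cleaned ++ [t']) []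
  PySem.Str.join " " cleaned

-- ===== PORT B =====
def titles_to_doc_py_alt (titles : List String) : String :=
  -- `t or ""` on a string is `t` when non-empty, else ""
  normalize_text_py (PySem.Str.join " " (titles.map (fun t => if t = "" then "" else t)))

-- ===== PRECONDITION & SPEC =====
def Spec_titles_to_doc_py (titles : List String) (out : String) : Prop := out = titles_to_doc_py_alt titles
instance (titles : List String) (out : String) : Decidable (Spec_titles_to_doc_py titles out) := by unfold Spec_titles_to_doc_py; infer_instance

-- ===== CLAIM (what is proved, stated in full; the proofs are below) =====
def Claim_equal_titles_to_doc_py : Prop := ∀ (titles : List String), Dom_titles_to_doc_py titles → Spec_titles_to_doc_py titles (titles_to_doc_py titles)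

-- ===== LEMMAS AND PROOFS =====

-- the character substitution performed by `_normalize_text` before splitting
def pvSub (c : Char) (x : Char) : Char := if x = c then ' ' else x

def pvG (x : Char) : Char := pvSub '\t' (pvSub '\n' (PySem.Chars.lowerChar x))

def pvPre (l : List Char) : List Char := l.map pvG

-- word list of one title after normalization
def pvW (t : String) : List (List Char) := PySem.Chars.split₀ (pvPre t.toList)

-- "space-prefixed flatten": intercalate [' '] l = (pvHsp l).tail
def pvHsp (l : List (List Char)) : List Char := l.flatMap (fun w => ' ' :: w)

theorem pvHsp_cons (x : List Char) (xs : List (List Char)) :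
    pvHsp (x :: xs) = (' ' :: x) ++ pvHsp xs := by simp [pvHsp]

theorem pvHsp_append (a b : List (List Char)) : pvHsp (a ++ b) = pvHsp a ++ pvHsp b := by
  simp [pvHsp]

theorem interc_cons (x : List Char) (xs : List (List Char)) :
    List.intercalate [' '] (x :: xs) = x ++ pvHsp xs := by
  induction xs generalizing x with
  | nil => simp [List.intercalate, pvHsp]
  | cons y ys ih =>
    simp only [List.intercalate, List.intersperse, List.flatten] at *
    simp [pvHsp] at ih ⊢
    simp [ih y]

theorem interc_eq_tail (l : List (List Char)) :
    List.intercalate [' '] l = (pvHsp l).tail := by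
  cases l with
  | nil => simp [List.intercalate, pvHsp]
  | cons x xs => simp [interc_cons, pvHsp_cons]

theorem tail_map {α β : Type} (f : α → β) (l : List α) : (l.map f).tail = l.tail.map f := by
  cases l <;> simp

-- replace with a single-character pattern is a map
theorem replace_go_single (c d : Char) : ∀ (n : Nat) (l : List Char) (acc : List Char),
    l.length ≤ n →
    PySem.Chars.replace.go [c] [d] n l acc = acc.reverse ++ l.map (fun x => if x = c then d else x) := by
  intro n
  induction n with
  | zero =>
    intro l acc h
    have : l = [] := List.eq_nil_of_length_eq_zero (Nat.le_zero.mp h)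
    subst this; simp [PySem.Chars.replace.go]
  | succ n ih =>
    intro l acc h
    cases l with
    | nil => simp [PySem.Chars.replace.go]
    | cons x t =>
      have hlen : t.length ≤ n := by simpa using h
      simp only [PySem.Chars.replace.go]
      by_cases hx : (List.isPrefixOf [c] (x :: t)) = true
      · rw [if_pos hx]
        have hcx : c = x := by simpa [List.isPrefixOf] using hx
        subst hcx
        rw [ih (List.drop [c].length (c :: t)) ([d].reverse ++ acc) (by simpa using hlen)]
        simp
      · rw [if_neg hx]
        have hcx : ¬ c = x := by simpa [List.isPrefixOf] using hx
        rw [ih t (x :: acc) hlen]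
        have hxc : x ≠ c := fun h' => hcx h'.symm
        simp [hxc]

theorem chars_replace_single (c d : Char) (l : List Char) :
    PySem.Chars.replace l [c] [d] = l.map (fun x => if x = c then d else x) := by
  simp only [PySem.Chars.replace, List.isEmpty]
  rw [if_neg (by simp)]
  exact replace_go_single c d l.length l [] le_rfl

-- split₀ facts --------------------------------------------------------------

theorem split_go_acc (s : List Char) : ∀ (cur : List Char) (acc' : List (List Char)),
    PySem.Chars.split₀.go s cur acc' = acc'.reverse ++ PySem.Chars.split₀.go s cur [] := by
  induction s with
  | nil => intro cur acc'; by_cases h : cur.isEmpty <;> simp [PySem.Chars.split₀.go, h]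
  | cons c rest ih =>
    intro cur acc'
    by_cases hsp : PySem.Chars.isspace c
    · by_cases hcur : cur.isEmpty
      · simp only [PySem.Chars.split₀.go, hsp, hcur, if_true]
        exact ih [] acc'
      · simp only [PySem.Chars.split₀.go, hsp, hcur, if_true, if_false]
        rw [ih [] (cur.reverse :: acc'), ih [] [cur.reverse]]
        simp
    · simp only [PySem.Chars.split₀.go, hsp, if_false]
      exact ih _ acc'

theorem split_go_space (a b : List Char) : ∀ (cur : List Char),
    PySem.Chars.split₀.go (a ++ ' ' :: b) cur [] =
      PySem.Chars.split₀.go a cur [] ++ PySem.Chars.split₀.go b [] [] := by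
  induction a with
  | nil =>
    intro cur
    by_cases hcur : cur.isEmpty
    · have hc : cur = [] := by simpa [List.isEmpty_iff] using hcur
      subst hc
      simp [PySem.Chars.split₀.go, show PySem.Chars.isspace ' ' = true by decide]
    · simp only [List.nil_append, PySem.Chars.split₀.go,
        show PySem.Chars.isspace ' ' = true by decide, if_true, hcur, if_false]
      rw [split_go_acc b [] [cur.reverse]]
      simp [PySem.Chars.split₀.go, hcur]
  | cons c a' ih =>
    intro cur
    by_cases hsp : PySem.Chars.isspace c
    · by_cases hcur : cur.isEmpty
      · simp only [List.cons_append, PySem.Chars.split₀.go, hsp, hcur, if_true]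
        exact ih []
      · simp only [List.cons_append, PySem.Chars.split₀.go, hsp, hcur, if_true, if_false]
        rw [split_go_acc (a' ++ ' ' :: b) [] [cur.reverse],
            split_go_acc a' [] [cur.reverse], ih []]
        simp
    · simp only [List.cons_append, PySem.Chars.split₀.go, hsp, if_false]
      exact ih _

theorem split_space (a b : List Char) :
    PySem.Chars.split₀ (a ++ ' ' :: b) = PySem.Chars.split₀ a ++ PySem.Chars.split₀ b := by
  simpa [PySem.Chars.split₀] using split_go_space a b []

-- every word produced by split₀ is non-empty
theorem split_go_words (s : List Char) : ∀ (cur : List Char) (acc : List (List Char)),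
    (∀ x ∈ acc, x ≠ []) → ∀ x ∈ PySem.Chars.split₀.go s cur acc, x ≠ [] := by
  induction s with
  | nil =>
    intro cur acc hacc x hx
    by_cases hcur : cur.isEmpty
    · simp only [PySem.Chars.split₀.go, hcur, if_true, List.mem_reverse] at hx
      exact hacc x hx
    · simp [PySem.Chars.split₀.go, hcur] at hx
      rcases hx with h | h
      · exact hacc x h
      · subst h; simpa [List.isEmpty_iff] using hcur
  | cons c rest ih =>
    intro cur acc hacc x hx
    by_cases hsp : PySem.Chars.isspace c
    · by_cases hcur : cur.isEmpty
      · simp only [PySem.Chars.split₀.go, hsp, hcur, if_true] at hx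
        exact ih [] acc hacc x hx
      · simp only [PySem.Chars.split₀.go, hsp, hcur, if_true, if_false] at hx
        refine ih [] (cur.reverse :: acc) ?_ x hx
        intro y hy
        rcases List.mem_cons.mp hy with h | h
        · subst h; simpa [List.isEmpty_iff] using hcur
        · exact hacc y h
    · simp only [PySem.Chars.split₀.go, hsp, if_false] at hx
      exact ih (c :: cur) acc hacc x hx

theorem split_words (s : List Char) : ∀ x ∈ PySem.Chars.split₀ s, x ≠ [] :=
  split_go_words s [] [] (by simp)

-- Chars.join with " " in tail form
theorem join_eq_tail (l : List (List Char)) :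
    PySem.Chars.join [' '] l = (pvHsp l).tail := by
  simpa [PySem.Chars.join] using interc_eq_tail l

-- the transform before splitting, on the chars side
theorem pre_toList (t : String) :
    (PySem.Str.replace (PySem.Str.replace (PySem.Str.lower t) "\n" " ") "\t" " ").toList =
      pvPre t.toList := by
  simp only [PySem.Str.toList_replace, PySem.Str.toList_lower]
  rw [show String.toList "\n" = ['\n'] from rfl, show String.toList "\t" = ['\t'] from rfl,
      show String.toList " " = [' '] from rfl]
  rw [chars_replace_single, chars_replace_single]
  simp [pvPre, pvSub, pvG, PySem.Chars.lower]

-- normalize, on the chars side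
theorem normalize_toList (t : String) :
    (normalize_text_py t).toList = PySem.Chars.join [' '] (pvW t) := by
  simp only [normalize_text_py, PySem.Str.toList_join]
  rw [PySem.Str.split₀_map_toList, pre_toList,
      show String.toList " " = [' '] from rfl]
  rfl

theorem normalize_empty_iff (t : String) : normalize_text_py t = "" ↔ pvW t = [] := by
  rw [← String.toList_inj, normalize_toList, join_eq_tail,
      show String.toList "" = [] from rfl]
  cases hw : pvW t with
  | nil => simp [pvHsp]
  | cons w ws =>
    have hmem : w ∈ pvW t := by rw [hw]; exact List.mem_cons_self ..
    have hwne : w ≠ [] := split_words (pvPre t.toList) w hmem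
    rw [pvHsp_cons]
    simp [hwne]

-- A's foldl is a filter-map
theorem foldl_filter (ts : List String) : ∀ (init : List String),
    ts.foldl (fun cleaned t =>
      let t' := normalize_text_py t
      if t' = "" then cleaned else cleaned ++ [t']) init =
    init ++ (ts.filter (fun t => !(normalize_text_py t == ""))).map normalize_text_py := by
  induction ts with
  | nil => intro init; simp
  | cons t ts ih =>
    intro init
    by_cases h : normalize_text_py t = "" <;> simp [h, ih]

-- key flattening lemma, in tail form
theorem hsp_flatten (wss : List (List (List Char))) :
    pvHsp ((wss.filter (fun ws => !(ws == []))).map (fun ws => (pvHsp ws).tail)) =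
      pvHsp wss.flatten := by
  induction wss with
  | nil => rfl
  | cons ws rest ih =>
    cases ws with
    | nil => simpa [pvHsp] using ih
    | cons w ws' =>
      simp only [List.filter_cons, show ((w :: ws' : List (List Char)) == []) = false by simp,
        Bool.not_false, if_true, List.map_cons, List.flatten_cons]
      rw [pvHsp_cons, pvHsp_append, ← ih, pvHsp_cons w ws']
      simp

-- pvPre distributes over the space-join
theorem pre_hsp (l : List (List Char)) :
    (pvHsp l).map pvG = pvHsp (l.map pvPre) := by
  induction l with
  | nil => rfl
  | cons x xs ih =>
    rw [pvHsp_cons, List.map_cons, pvHsp_cons, List.map_append, ih]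
    simp [pvPre, show pvG ' ' = ' ' from rfl]

theorem pre_interc (ls : List (List Char)) :
    pvPre (List.intercalate [' '] ls) = List.intercalate [' '] (ls.map pvPre) := by
  rw [interc_eq_tail, interc_eq_tail]
  simp only [pvPre]
  rw [← tail_map, pre_hsp]

-- split₀ over the space-join
theorem split_intercalate (ls : List (List Char)) :
    PySem.Chars.split₀ (List.intercalate [' '] ls) = (ls.map PySem.Chars.split₀).flatten := by
  induction ls with
  | nil => rfl
  | cons x xs ih =>
    cases xs with
    | nil => simp [List.intercalate, List.intersperse]
    | cons y ys =>
      rw [interc_cons, pvHsp_cons, List.cons_append, split_space, ← interc_cons, ih]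
      simp

-- chars-level value of port A
theorem portA_toList (titles : List String) :
    (titles_to_doc_py titles).toList = (pvHsp (titles.map pvW).flatten).tail := by
  have hX : ∀ ts : List String, List.map String.toList
      (List.map normalize_text_py (List.filter (fun t => !(normalize_text_py t == "")) ts)) =
      ((ts.map pvW).filter (fun ws => !(ws == []))).map (fun ws => (pvHsp ws).tail) := by
    intro ts
    induction ts with
    | nil => rfl
    | cons t ts ih =>
      by_cases h : pvW t = []
      · have h1 : normalize_text_py t = "" := (normalize_empty_iff t).mpr h
        simp only [List.map_cons, List.filter_cons, h1, h]
        simpa using ih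
      · have h1 : ¬ normalize_text_py t = "" := fun he => h ((normalize_empty_iff t).mp he)
        simp only [List.map_cons, List.filter_cons,
          show (normalize_text_py t == "") = false from by simp [h1],
          show ((pvW t : List (List Char)) == []) = false from by simp [h],
          Bool.not_false, if_true, List.map_cons]
        rw [ih, normalize_toList, join_eq_tail]
  simp only [titles_to_doc_py]
  rw [foldl_filter, List.nil_append, PySem.Str.toList_join,
      show String.toList " " = [' '] from rfl, join_eq_tail, hX titles, hsp_flatten]

-- chars-level value of port B
theorem portB_toList (titles : List String) :
    (titles_to_doc_py_alt titles).toList = (pvHsp (titles.map pvW).flatten).tail := by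
  simp only [titles_to_doc_py_alt]
  rw [normalize_toList, join_eq_tail]
  congr 2
  simp only [pvW, PySem.Str.toList_join, show String.toList " " = [' '] from rfl,
    PySem.Chars.join]
  have harg : List.map String.toList (titles.map (fun t => if t = "" then "" else t)) =
      titles.map String.toList := by
    rw [List.map_map]
    apply List.map_congr_left
    intro t _
    by_cases h : t = "" <;> simp [h]
  rw [harg, pre_interc, split_intercalate, List.map_map]
  congr 1
  rw [List.map_map]
  apply List.map_congr_left
  intro t _
  rfl

-- ===== VERDICT (by name: the statement is the Claim_ definition above) =====
theorem titles_to_doc_py_spec : Claim_equal_titles_to_doc_py := by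
  intro titles _
  unfold Spec_titles_to_doc_py
  rw [← String.toList_inj, portA_toList, portB_toList]
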